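-- pv_equiv track=rewrite | github.com/Priyanshu966/Python-Questions | 6.recursion/1.easy/19.Check-AB/check_ab.py | check_ab_main
-- ===== SOURCE A (Python) =====
-- def check_ab_main(string,i):
--     if i == len(string):
--         return True
--
--     if string[i] == 'a' and i < len(string) - 2:
--         if string[i + 1] != 'a' and string[i + 1:i + 4] != 'bb':
--             return False
--     if string[i] == 'a' and i == len(string) - 2:
--         if string[i + 1] != 'a':
--             return False
--     if i < len(string) - 2 and string[i:i + 3] == 'bb':
--         if string[i + 2] != 'a':
--             return False
--
--     return check_ab_main(string,i + 1)
-- ===== SOURCE B (Python) =====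
-- def check_ab_main(string, i):
--     # Single loop; the three guarded checks collapse to one condition:
--     # every 'a' before the last position must be followed by 'a', except an
--     # 'a' at position n-3 when the string ends with 'bb'.  (A's third 'bb'
--     # block compares a length-3 slice with 'bb' and can never fire.)
--     n = len(string)
--     for j in range(i, n - 1):
--         if string[j] == 'a' and string[j + 1] != 'a' and not (j == n - 3 and string.endswith('bb')):
--             return False
--     return True
-- ===== Notes on version B (the rewrite author's own statement) =====
-- stated objective: simpler
-- what changed: Replaced the self-recursion with three guarded slice checks by a single iterative loop over range(i, n-1) testing one merged condition: an 'a' not followed by 'a' fails unless it sits at n-3 and the string ends with 'bb' (A's third 'bb' block is dead code and the slice comparisons reduce to this endswith test).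
import Mathlib
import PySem

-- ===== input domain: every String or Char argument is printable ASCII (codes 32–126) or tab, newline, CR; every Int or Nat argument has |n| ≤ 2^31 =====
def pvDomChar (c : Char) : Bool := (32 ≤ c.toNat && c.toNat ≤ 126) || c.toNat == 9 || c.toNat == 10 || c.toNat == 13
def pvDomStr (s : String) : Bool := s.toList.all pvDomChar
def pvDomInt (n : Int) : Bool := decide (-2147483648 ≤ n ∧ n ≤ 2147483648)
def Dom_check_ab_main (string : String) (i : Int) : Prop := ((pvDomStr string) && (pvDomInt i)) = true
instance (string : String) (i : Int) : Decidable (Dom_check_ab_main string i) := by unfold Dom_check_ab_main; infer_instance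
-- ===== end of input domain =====

-- B replaces A's self-recursion with three guarded slice checks by one loop over range(i, n-1) testing a single merged condition ('a' must be followed by 'a', except at n-3 when the string ends with "bb"); objective: simpler.


-- ===== PORT A =====
-- Literal port of A's recursion; the out-of-range guard is where Python raises
-- IndexError — those inputs are excluded by Pre_check_ab_main below.
def abRecA (cs : List Char) (i : Int) : Bool :=
  if i = (cs.length : Int) then true
  else if (cs.length : Int) < i ∨ i < -(cs.length : Int) then false  -- Python: IndexError (outside Pre_)
  else
    if (PySem.List.pyGet? cs i == some 'a') && decide (i < (cs.length : Int) - 2) &&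
       !(PySem.List.pyGet? cs (i+1) == some 'a') &&
       !(PySem.List.slice cs (some (i+1)) (some (i+4)) == ['b','b']) then false
    else if (PySem.List.pyGet? cs i == some 'a') && (i == (cs.length : Int) - 2) &&
            !(PySem.List.pyGet? cs (i+1) == some 'a') then false
    else if decide (i < (cs.length : Int) - 2) &&
            (PySem.List.slice cs (some i) (some (i+3)) == ['b','b']) &&
            !(PySem.List.pyGet? cs (i+2) == some 'a') then false
    else abRecA cs (i+1)
termination_by ((cs.length : Int) - i).toNat
decreasing_by omega

def check_ab_main (string : String) (i : Int) : Bool := abRecA string.toList i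

-- ===== PORT B =====
-- B's merged per-index condition: an 'a' not followed by 'a' fails, except at
-- index n-3 of a string ending with "bb".
def abOkB (cs : List Char) (j : Int) : Bool :=
  !((PySem.List.pyGet? cs j == some 'a') &&
    !(PySem.List.pyGet? cs (j+1) == some 'a') &&
    !(decide (j = (cs.length : Int) - 3) && PySem.Chars.endswith cs ['b','b']))

def check_ab_main_alt (string : String) (i : Int) : Bool :=
  (PySem.List.pyRange i ((string.toList.length : Int) - 1) 1).all (abOkB string.toList)

-- ===== PRECONDITION & SPEC =====
-- Pre_ excludes exactly the inputs where A raises IndexError: an index i with i > len(string) or i < -len(string).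
def Pre_check_ab_main (string : String) (i : Int) : Prop :=
  -(string.toList.length : Int) ≤ i ∧ i ≤ (string.toList.length : Int)
instance (string : String) (i : Int) : Decidable (Pre_check_ab_main string i) := by
  unfold Pre_check_ab_main; infer_instance

def pvWitness_check_ab_main : String × Int := ("abab", 0)

def Spec_check_ab_main (string : String) (i : Int) (out : Bool) : Prop := out = check_ab_main_alt string i
instance (string : String) (i : Int) (out : Bool) : Decidable (Spec_check_ab_main string i out) := by unfold Spec_check_ab_main; infer_instance

-- ===== CLAIM (what is proved, stated in full; the proofs are below) =====
def Claim_equal_check_ab_main : Prop := ∀ (string : String) (i : Int), Dom_check_ab_main string i → Pre_check_ab_main string i → Spec_check_ab_main string i (check_ab_main string i)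

-- ===== LEMMAS AND PROOFS =====

-- A's three violation checks at one index, as one boolean (proof-only helper).
def firesA (cs : List Char) (i : Int) : Bool :=
  ((PySem.List.pyGet? cs i == some 'a') && decide (i < (cs.length : Int) - 2) &&
       !(PySem.List.pyGet? cs (i+1) == some 'a') &&
       !(PySem.List.slice cs (some (i+1)) (some (i+4)) == ['b','b']))
  || ((PySem.List.pyGet? cs i == some 'a') && (i == (cs.length : Int) - 2) &&
       !(PySem.List.pyGet? cs (i+1) == some 'a'))
  || (decide (i < (cs.length : Int) - 2) &&
       (PySem.List.slice cs (some i) (some (i+3)) == ['b','b']) &&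
       !(PySem.List.pyGet? cs (i+2) == some 'a'))

lemma clampIdx_int_nonneg (n : Nat) (i : Int) (h : 0 ≤ i) :
    ((PySem.List.clampIdx n i : Nat) : Int) = min i n := by
  unfold PySem.List.clampIdx; split_ifs <;> omega

lemma clampIdx_int_neg (n : Nat) (i : Int) (h : i < 0) :
    ((PySem.List.clampIdx n i : Nat) : Int) = max 0 ((n : Int) + i) := by
  unfold PySem.List.clampIdx; split_ifs <;> omega

lemma clampIdx_int (n : Nat) (i : Int) :
    ((PySem.List.clampIdx n i : Nat) : Int) =
      if i < 0 then max 0 ((n : Int) + i) else min i n := by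
  split_ifs with h
  · exact clampIdx_int_neg n i h
  · exact clampIdx_int_nonneg n i (by omega)

-- A slice compared with a length-2 literal can only be equal if its length is 2.
lemma slice_len_two {cs : List Char} {a b : Int}
    (h : PySem.List.slice cs (some a) (some b) = ['b','b']) :
    (PySem.List.slice cs (some a) (some b)).length = 2 := by rw [h]; rfl

-- A's first slice test s[i+1:i+4] == 'bb' is exactly "i = n-3 and s ends with bb".
lemma sliceA_eq (cs : List Char) (i : Int)
    (hlo : -(cs.length : Int) ≤ i) (hhi : i < (cs.length : Int) - 2) :
    (PySem.List.slice cs (some (i+1)) (some (i+4)) == ['b','b']) =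
      (decide (i = (cs.length : Int) - 3) && PySem.Chars.endswith cs ['b','b']) := by
  by_cases hc : i = (cs.length : Int) - 3
  · have hn : 2 ≤ cs.length := by omega
    subst hc
    have h1 : ((cs.length : Int) - 3 + 1) = ((cs.length - 2 : Nat) : Int) := by omega
    have h4 : ((cs.length : Int) - 3 + 4) = ((cs.length + 1 : Nat) : Int) := by omega
    rw [h1, h4, PySem.List.slice_natCast]
    have htk : (cs.drop (cs.length - 2)).take (cs.length + 1 - (cs.length - 2)) =
        cs.drop (cs.length - 2) := by
      apply List.take_of_length_le; simp; omega
    rw [htk]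
    simp only [decide_true, Bool.true_and]
    rw [Bool.eq_iff_iff]
    constructor
    · intro h
      rw [PySem.Chars.endswith_iff, List.suffix_iff_eq_drop]
      have : cs.length - (['b','b'] : List Char).length = cs.length - 2 := by simp
      rw [this]
      exact (beq_iff_eq.mp h).symm
    · intro h
      rw [PySem.Chars.endswith_iff, List.suffix_iff_eq_drop] at h
      simp only [List.length_cons, List.length_nil] at h
      exact beq_iff_eq.mpr h.symm
  · have hne : ¬ PySem.List.slice cs (some (i+1)) (some (i+4)) = ['b','b'] := by
      intro h
      have hl2 := slice_len_two h
      rw [PySem.List.length_slice] at hl2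
      have c1 := clampIdx_int cs.length (i+1)
      have c4 := clampIdx_int cs.length (i+4)
      split_ifs at c1 c4 <;> omega
    simp [hne, hc]

-- A's third check s[i:i+3] == 'bb' can never be true under its guard i < n-2.
lemma sliceB_ne (cs : List Char) (i : Int)
    (hlo : -(cs.length : Int) ≤ i) (hhi : i < (cs.length : Int) - 2) :
    (PySem.List.slice cs (some i) (some (i+3)) == ['b','b']) = false := by
  rw [beq_eq_false_iff_ne]
  intro h
  have hl2 := slice_len_two h
  rw [PySem.List.length_slice] at hl2
  have c0 := clampIdx_int cs.length i
  have c3 := clampIdx_int cs.length (i+3)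
  split_ifs at c0 c3 <;> omega

-- Pointwise: A's merged violation test is the negation of B's per-index condition.
lemma firesA_eq_not_okB (cs : List Char) (i : Int)
    (hlo : -(cs.length : Int) ≤ i) (hhi : i < (cs.length : Int) - 1) :
    firesA cs i = !(abOkB cs i) := by
  unfold firesA abOkB
  by_cases hc : i < (cs.length : Int) - 2
  · rw [sliceA_eq cs i hlo hc, sliceB_ne cs i hlo hc]
    have h2 : (i == (cs.length : Int) - 2) = false := by simp; omega
    rw [h2]
    cases hA : (PySem.List.pyGet? cs i == some 'a') <;>
    cases hB : (PySem.List.pyGet? cs (i+1) == some 'a') <;>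
    cases hX : (decide (i = (cs.length : Int) - 3) && PySem.Chars.endswith cs ['b','b']) <;>
    simp [hc]
  · have hi2 : i = (cs.length : Int) - 2 := by omega
    have h2 : (i == (cs.length : Int) - 2) = true := by simp [hi2]
    have h3 : decide (i = (cs.length : Int) - 3) = false := by simp; omega
    have hg : decide (i < (cs.length : Int) - 2) = false := by simp; omega
    rw [h2, h3, hg]
    cases hA : (PySem.List.pyGet? cs i == some 'a') <;>
    cases hB : (PySem.List.pyGet? cs (i+1) == some 'a') <;>
    simp

-- firesA is false at the last index n-1 (all three guards fail).
lemma firesA_last (cs : List Char) :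
    firesA cs ((cs.length : Int) - 1) = false := by
  unfold firesA
  have h1 : ¬ ((cs.length : Int) - 1 < (cs.length : Int) - 2) := by omega
  have h2 : (((cs.length : Int) - 1) == ((cs.length : Int) - 2)) = false := by
    rw [beq_eq_false_iff_ne]; omega
  simp [h1, h2]

-- One unfolding step of A's recursion.
lemma abRecA_step (cs : List Char) (i : Int)
    (hlo : -(cs.length : Int) ≤ i) (hhi : i < (cs.length : Int)) :
    abRecA cs i = (!(firesA cs i) && abRecA cs (i+1)) := by
  rw [abRecA]
  have h1 : ¬ (i = (cs.length : Int)) := by omega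
  have h2 : ¬ ((cs.length : Int) < i ∨ i < -(cs.length : Int)) := by omega
  simp only [if_neg h1, if_neg h2]
  unfold firesA
  cases hb1 : ((PySem.List.pyGet? cs i == some 'a') && decide (i < (cs.length : Int) - 2) &&
       !(PySem.List.pyGet? cs (i+1) == some 'a') &&
       !(PySem.List.slice cs (some (i+1)) (some (i+4)) == ['b','b'])) <;>
  cases hb2 : ((PySem.List.pyGet? cs i == some 'a') && (i == (cs.length : Int) - 2) &&
            !(PySem.List.pyGet? cs (i+1) == some 'a')) <;>
  cases hb3 : (decide (i < (cs.length : Int) - 2) &&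
            (PySem.List.slice cs (some i) (some (i+3)) == ['b','b']) &&
            !(PySem.List.pyGet? cs (i+2) == some 'a')) <;>
  simp

-- Main invariant: A's recursion from i equals B's all-quantified loop over range(i, n-1).
lemma abRecA_eq_all (cs : List Char) (i : Int)
    (hlo : -(cs.length : Int) ≤ i) (hhi : i ≤ (cs.length : Int)) :
    abRecA cs i = (PySem.List.pyRange i ((cs.length : Int) - 1) 1).all (abOkB cs) := by
  have hk : ∃ k : Nat, ((cs.length : Int) - i).toNat = k := ⟨_, rfl⟩
  obtain ⟨k, hk⟩ := hk
  induction k generalizing i with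
  | zero =>
      have hi : i = (cs.length : Int) := by omega
      subst hi
      rw [abRecA, PySem.List.pyRange_one_eq_nil (by omega)]
      simp
  | succ k ih =>
      have hlt : i < (cs.length : Int) := by omega
      rw [abRecA_step cs i hlo hlt]
      by_cases hlast : i = (cs.length : Int) - 1
      · subst hlast
        rw [firesA_last cs]
        have ht : abRecA cs ((cs.length : Int) - 1 + 1) = true := by
          have he : (cs.length : Int) - 1 + 1 = (cs.length : Int) := by omega
          rw [he, abRecA]; simp
        rw [ht, PySem.List.pyRange_one_eq_nil (le_refl _)]
        simp
      · rw [PySem.List.pyRange_one_cons (show i < (cs.length : Int) - 1 by omega)]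
        simp only [List.all_cons]
        rw [firesA_eq_not_okB cs i hlo (by omega), ih (i+1) (by omega) (by omega) (by omega)]
        simp

-- ===== VERDICT (by name: the statement is the Claim_ definition above) =====
theorem check_ab_main_spec : Claim_equal_check_ab_main := by
  intro string i _ hpre
  unfold Spec_check_ab_main check_ab_main check_ab_main_alt
  exact abRecA_eq_all string.toList i hpre.1 hpre.2
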